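-- pv_equiv track=rewrite | github.com/giach/coding-spells | Python/coinchange.py | nz_min
-- ===== SOURCE A (Python) =====
-- def nz_min(line):
--     if len(line) == 0:
--         return 0
--     line = [i for i in line if i != 0]
--
--     if len(line) == 0:
--         return 0
--     else:
--         return min(line)
-- ===== SOURCE B (Python) =====
-- def nz_min(line):
--     best = None
--     for i in line:
--         if i != 0 and (best is None or i < best):
--             best = i
--     return 0 if best is None else best
-- ===== Notes on version B (the rewrite author's own statement) =====
-- stated objective: simpler
-- what changed: replaced the two-phase filter-comprehension-then-min (with two length checks) by one fused pass keeping a running minimum in an Option sentinel, returning 0 when it stays unset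
import Mathlib
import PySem

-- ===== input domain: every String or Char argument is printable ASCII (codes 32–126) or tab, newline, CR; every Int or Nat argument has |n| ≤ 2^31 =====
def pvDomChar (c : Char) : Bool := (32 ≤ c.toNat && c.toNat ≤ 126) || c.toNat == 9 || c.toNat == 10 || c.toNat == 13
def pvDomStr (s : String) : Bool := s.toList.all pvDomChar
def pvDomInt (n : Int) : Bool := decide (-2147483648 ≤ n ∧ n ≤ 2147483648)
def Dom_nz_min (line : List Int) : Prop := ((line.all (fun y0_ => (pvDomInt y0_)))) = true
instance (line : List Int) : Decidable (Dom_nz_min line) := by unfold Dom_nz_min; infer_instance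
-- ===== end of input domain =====

-- ===== PORT A =====
-- B fuses A's filter comprehension and min() into one pass with an Option running minimum; simpler, no intermediate list.
def nz_min (line : List Int) : Int :=
  if line.length = 0 then 0
  else
    let line2 := line.filter (fun i => decide (i ≠ 0))
    if line2.length = 0 then 0
    else (PySem.List.min? line2 (fun x => x)).getD 0

-- ===== PORT B =====
def nzStep (best : Option Int) (i : Int) : Option Int :=
  if i ≠ 0 ∧ (best.isNone ∨ i < best.getD 0) then some i else best

def nz_min_alt (line : List Int) : Int :=
  match line.foldl nzStep none with
  | none => 0
  | some b => b

-- ===== PRECONDITION & SPEC =====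
def Spec_nz_min (line : List Int) (out : Int) : Prop := out = nz_min_alt line
instance (line : List Int) (out : Int) : Decidable (Spec_nz_min line out) := by unfold Spec_nz_min; infer_instance

-- ===== CLAIM (what is proved, stated in full; the proofs are below) =====
def Claim_equal_nz_min : Prop := ∀ (line : List Int), Dom_nz_min line → Spec_nz_min line (nz_min line)

-- ===== LEMMAS AND PROOFS =====
theorem fold_nzStep_some (l : List Int) : ∀ (b : Int),
    l.foldl nzStep (some b) = some ((l.filter (fun i => decide (i ≠ 0))).foldl min b) := by
  induction l with
  | nil => intro b; simp
  | cons i t ih =>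
    intro b
    by_cases hi : i = 0
    · subst hi
      simp [nzStep, ih]
    · by_cases hlt : i < b
      · simp [nzStep, hi, hlt, ih, min_eq_right (le_of_lt hlt)]
      · simp [nzStep, hi, hlt, ih, min_eq_left (le_of_not_gt hlt)]

theorem fold_nzStep_none (l : List Int) :
    l.foldl nzStep none =
      match l.filter (fun i => decide (i ≠ 0)) with
      | [] => none
      | x :: t => some (t.foldl min x) := by
  induction l with
  | nil => simp
  | cons i t ih =>
    by_cases hi : i = 0
    · subst hi; simpa using ih
    · simp [nzStep, hi, fold_nzStep_some]

-- ===== VERDICT (by name: the statement is the Claim_ definition above) =====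
theorem nz_min_spec : Claim_equal_nz_min := by
  intro line _
  unfold Spec_nz_min nz_min nz_min_alt
  rw [fold_nzStep_none]
  rcases h : line.filter (fun i => decide (i ≠ 0)) with _ | ⟨x, t⟩
  · rcases line with _ | _ <;> simp
  · have hne : line.length ≠ 0 := by
      intro h0
      rw [List.length_eq_zero_iff] at h0
      subst h0; simp at h
    simp [hne, PySem.List.min?_id_cons]
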